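-- pv_equiv track=rewrite | github.com/AnvayUparkar/AI_Health_prediction | project/backend/fallback_monitoring_engine.py | get_risk_level
-- ===== SOURCE A (Python) =====
-- def get_risk_level(alerts):
--     """Determine risk level from alerts."""
--     if not alerts:
--         return "LOW"
--     alert_types = [a.get('type', '').upper() for a in alerts]
--     if "CRITICAL" in alert_types:
--         return "CRITICAL"
--     if "HIGH" in alert_types:
--         return "HIGH"
--     if "WARNING" in alert_types:
--         return "MODERATE"
--     return "LOW"
-- ===== SOURCE B (Python) =====
-- _RANK = {'CRITICAL': 3, 'HIGH': 2, 'WARNING': 1}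
-- _LEVELS = ["LOW", "MODERATE", "HIGH", "CRITICAL"]
--
-- def get_risk_level(alerts):
--     """Determine risk level from alerts (single pass, max rank)."""
--     best = 0
--     for a in alerts:
--         r = _RANK.get(a.get('type', '').upper(), 0)
--         if best < r:
--             best = r
--     return _LEVELS[best]
-- ===== Notes on version B (the rewrite author's own statement) =====
-- stated objective: simpler
-- what changed: Instead of materialising the upper-cased type list and scanning it three times with membership tests, B makes one pass over alerts keeping the maximum of a rank assigned per type, then maps the max rank back to a label.
import Mathlib
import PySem

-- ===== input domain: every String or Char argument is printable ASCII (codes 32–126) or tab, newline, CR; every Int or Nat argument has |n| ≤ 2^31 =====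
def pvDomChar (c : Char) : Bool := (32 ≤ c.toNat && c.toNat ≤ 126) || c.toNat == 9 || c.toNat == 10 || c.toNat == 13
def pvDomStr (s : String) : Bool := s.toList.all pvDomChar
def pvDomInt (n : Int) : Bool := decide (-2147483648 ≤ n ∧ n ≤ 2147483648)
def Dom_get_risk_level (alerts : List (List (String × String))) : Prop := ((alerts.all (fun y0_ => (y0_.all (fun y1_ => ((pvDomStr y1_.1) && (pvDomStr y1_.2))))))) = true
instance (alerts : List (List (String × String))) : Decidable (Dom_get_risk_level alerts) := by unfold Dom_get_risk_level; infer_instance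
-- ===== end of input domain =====

-- B replaces A's materialised type list and three membership scans by one pass keeping the maximum rank (objective: simpler).

-- ===== PORT A =====
-- a.get('type', '').upper()
def pvTypeOf (a : List (String × String)) : String :=
  PySem.Str.upper ((PySem.Dict.mk a).getD "type" "")

def get_risk_level (alerts : List (List (String × String))) : String :=
  if alerts = [] then "LOW"
  else
    let alert_types := alerts.map pvTypeOf
    if "CRITICAL" ∈ alert_types then "CRITICAL"
    else if "HIGH" ∈ alert_types then "HIGH"
    else if "WARNING" ∈ alert_types then "MODERATE"
    else "LOW"

-- ===== PORT B =====
def pvRankDict : PySem.Dict String Nat :=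
  PySem.Dict.mk [("CRITICAL", 3), ("HIGH", 2), ("WARNING", 1)]

def pvLevels : List String := ["LOW", "MODERATE", "HIGH", "CRITICAL"]

def get_risk_level_alt (alerts : List (List (String × String))) : String :=
  let best := alerts.foldl (fun best a =>
    let r := pvRankDict.getD (pvTypeOf a) 0
    if best < r then r else best) 0
  -- best is always ≤ 3, so getD equals Python's in-range indexing
  pvLevels.getD best "LOW"

-- ===== PRECONDITION & SPEC =====
def Spec_get_risk_level (alerts : List (List (String × String))) (out : String) : Prop := out = get_risk_level_alt alerts
instance (alerts : List (List (String × String))) (out : String) : Decidable (Spec_get_risk_level alerts out) := by unfold Spec_get_risk_level; infer_instance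

-- ===== CLAIM (what is proved, stated in full; the proofs are below) =====
def Claim_equal_get_risk_level : Prop := ∀ (alerts : List (List (String × String))), Dom_get_risk_level alerts → Spec_get_risk_level alerts (get_risk_level alerts)

-- ===== LEMMAS AND PROOFS =====

def pvRank (t : String) : Nat := pvRankDict.getD t 0

lemma pvRank_eq (t : String) :
    pvRank t = if t = "CRITICAL" then 3 else if t = "HIGH" then 2 else if t = "WARNING" then 1 else 0 := by
  by_cases h1 : t = "CRITICAL"
  · subst h1; rfl
  by_cases h2 : t = "HIGH"
  · subst h2; rfl
  by_cases h3 : t = "WARNING"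
  · subst h3; rfl
  have n1 : ¬("CRITICAL" = t) := fun h => h1 h.symm
  have n2 : ¬("HIGH" = t) := fun h => h2 h.symm
  have n3 : ¬("WARNING" = t) := fun h => h3 h.symm
  simp only [pvRank, pvRankDict, PySem.Dict.getD_eq_get?_getD, PySem.Dict.get?_mk_cons,
    beq_iff_eq, if_neg n1, if_neg n2, if_neg n3, if_neg h1, if_neg h2, if_neg h3]
  rfl

lemma pvRank_le (t : String) : pvRank t ≤ 3 := by
  rw [pvRank_eq]; split_ifs <;> omega

def pvMaxR (ts : List String) : Nat := ts.foldr (fun t m => max (pvRank t) m) 0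

lemma foldB_eq (l : List (List (String × String))) (b : Nat) :
    l.foldl (fun best a =>
      let r := pvRankDict.getD (pvTypeOf a) 0
      if best < r then r else best) b = max b (pvMaxR (l.map pvTypeOf)) := by
  induction l generalizing b with
  | nil => simp [pvMaxR]
  | cons a l ih =>
    simp only [List.foldl_cons, ih, List.map_cons, pvMaxR, List.foldr_cons]
    have : (if b < pvRankDict.getD (pvTypeOf a) 0 then pvRankDict.getD (pvTypeOf a) 0 else b)
        = max b (pvRank (pvTypeOf a)) := by
      unfold pvRank; split_ifs <;> omega
    rw [this]
    omega

lemma le_maxR_iff (ts : List String) (k : Nat) (hk : 1 ≤ k) :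
    k ≤ pvMaxR ts ↔ ∃ t ∈ ts, k ≤ pvRank t := by
  induction ts with
  | nil => simp [pvMaxR]; omega
  | cons t ts ih =>
    simp only [pvMaxR, List.foldr_cons] at *
    constructor
    · intro h
      rcases le_max_iff.mp h with h | h
      · exact ⟨t, List.mem_cons_self, h⟩
      · obtain ⟨u, hu, hr⟩ := ih.mp h
        exact ⟨u, List.mem_cons_of_mem _ hu, hr⟩
    · rintro ⟨u, hu, hr⟩
      rcases List.mem_cons.mp hu with rfl | hu
      · exact le_max_iff.mpr (Or.inl hr)
      · exact le_max_iff.mpr (Or.inr (ih.mpr ⟨u, hu, hr⟩))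

lemma maxR_three (ts : List String) : 3 ≤ pvMaxR ts ↔ "CRITICAL" ∈ ts := by
  rw [le_maxR_iff ts 3 (by omega)]
  constructor
  · rintro ⟨t, ht, hr⟩
    rw [pvRank_eq] at hr
    split_ifs at hr with h1 h2 h3 <;> first | (subst h1; exact ht) | omega
  · intro h; exact ⟨"CRITICAL", h, by rw [pvRank_eq]; simp⟩

lemma maxR_two (ts : List String) : 2 ≤ pvMaxR ts ↔ "CRITICAL" ∈ ts ∨ "HIGH" ∈ ts := by
  rw [le_maxR_iff ts 2 (by omega)]
  constructor
  · rintro ⟨t, ht, hr⟩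
    rw [pvRank_eq] at hr
    split_ifs at hr with h1 h2 h3 <;>
      first | (subst h1; exact Or.inl ht) | (subst h2; exact Or.inr ht) | omega
  · rintro (h | h)
    · exact ⟨"CRITICAL", h, by rw [pvRank_eq]; simp⟩
    · exact ⟨"HIGH", h, by rw [pvRank_eq]; simp⟩

lemma maxR_one (ts : List String) : 1 ≤ pvMaxR ts ↔ "CRITICAL" ∈ ts ∨ "HIGH" ∈ ts ∨ "WARNING" ∈ ts := by
  rw [le_maxR_iff ts 1 (by omega)]
  constructor
  · rintro ⟨t, ht, hr⟩
    rw [pvRank_eq] at hr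
    split_ifs at hr with h1 h2 h3 <;>
      first | (subst h1; exact Or.inl ht) | (subst h2; exact Or.inr (Or.inl ht))
            | (subst h3; exact Or.inr (Or.inr ht)) | omega
  · rintro (h | h | h)
    · exact ⟨"CRITICAL", h, by rw [pvRank_eq]; simp⟩
    · exact ⟨"HIGH", h, by rw [pvRank_eq]; simp⟩
    · exact ⟨"WARNING", h, by rw [pvRank_eq]; simp⟩

lemma maxR_le (ts : List String) : pvMaxR ts ≤ 3 := by
  induction ts with
  | nil => simp [pvMaxR]
  | cons t ts ih =>
    simp only [pvMaxR, List.foldr_cons] at *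
    have := pvRank_le t
    omega

-- ===== VERDICT (by name: the statement is the Claim_ definition above) =====
theorem get_risk_level_spec : Claim_equal_get_risk_level := by
  intro alerts _
  unfold Spec_get_risk_level get_risk_level get_risk_level_alt
  rw [foldB_eq]
  simp only [Nat.zero_max]
  set ts := alerts.map pvTypeOf with hts
  by_cases hnil : alerts = []
  · subst hnil; rfl
  · simp only [if_neg hnil]
    have h3 := maxR_three ts
    have h2 := maxR_two ts
    have h1 := maxR_one ts
    have hle := maxR_le ts
    have hcases : pvMaxR ts = 0 ∨ pvMaxR ts = 1 ∨ pvMaxR ts = 2 ∨ pvMaxR ts = 3 := by omega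
    rcases hcases with h | h | h | h <;> rw [h]
    · have hc : "CRITICAL" ∉ ts := fun hm => by have := h1.mpr (Or.inl hm); omega
      have hh : "HIGH" ∉ ts := fun hm => by have := h1.mpr (Or.inr (Or.inl hm)); omega
      have hw : "WARNING" ∉ ts := fun hm => by have := h1.mpr (Or.inr (Or.inr hm)); omega
      rw [if_neg hc, if_neg hh, if_neg hw]; rfl
    · have hc : "CRITICAL" ∉ ts := fun hm => by have := h2.mpr (Or.inl hm); omega
      have hh : "HIGH" ∉ ts := fun hm => by have := h2.mpr (Or.inr hm); omega
      have hw : "WARNING" ∈ ts := by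
        rcases h1.mp (by omega) with hm | hm | hm
        · exact absurd hm hc
        · exact absurd hm hh
        · exact hm
      rw [if_neg hc, if_neg hh, if_pos hw]; rfl
    · have hc : "CRITICAL" ∉ ts := fun hm => by have := h3.mpr hm; omega
      have hh : "HIGH" ∈ ts := by
        rcases h2.mp (by omega) with hm | hm
        · exact absurd hm hc
        · exact hm
      rw [if_neg hc, if_pos hh]; rfl
    · have hc : "CRITICAL" ∈ ts := h3.mp (by omega)
      rw [if_pos hc]; rfl
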